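-- pv_equiv track=rewrite | github.com/urwithajit9/bamfdetect | BAMF_Detect/modules/common/__init__.py | data_strings
-- ===== SOURCE A (Python) =====
-- from string import printable
--
-- def data_strings(data, min=4, charset=printable):
--     result = ""
--     for c in data:
--         if c in charset:
--             result += c
--             continue
--         if len(result) >= min:
--             yield result
--         result = ""
--     if len(result) >= min:
--         yield result
-- ===== SOURCE B (Python) =====
-- from string import printable
--
-- def data_strings(data, min=4, charset=printable):
--     # Split-then-filter: every non-charset char starts a new piece; a piece is
--     # yielded iff its length reaches min. Equivalent to A's inline accumulator.
--     members = set(charset)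
--     pieces = [[]]
--     for c in data:
--         if c in members:
--             pieces[-1].append(c)
--         else:
--             pieces.append([])
--     yield from (''.join(p) for p in pieces if len(p) >= min)
-- ===== Notes on version B (the rewrite author's own statement) =====
-- stated objective: idiomatic
-- what changed: B splits data into membership-run pieces first (one piece per separator, kept even when empty) and then filters/joins/yields the sufficiently long pieces in one final pass, instead of A's inline string accumulator that tests and yields at every run boundary; membership is via a set.
import Mathlib
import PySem

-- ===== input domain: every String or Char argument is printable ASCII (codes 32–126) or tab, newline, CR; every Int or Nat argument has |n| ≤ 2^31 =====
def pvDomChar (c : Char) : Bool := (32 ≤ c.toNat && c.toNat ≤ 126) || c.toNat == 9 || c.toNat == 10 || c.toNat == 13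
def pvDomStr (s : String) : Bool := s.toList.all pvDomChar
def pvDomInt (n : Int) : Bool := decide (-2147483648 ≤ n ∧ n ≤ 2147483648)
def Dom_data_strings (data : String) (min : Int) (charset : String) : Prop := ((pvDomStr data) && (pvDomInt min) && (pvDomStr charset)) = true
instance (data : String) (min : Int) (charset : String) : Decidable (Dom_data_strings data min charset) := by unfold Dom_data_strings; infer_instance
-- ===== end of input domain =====

-- B splits the input into membership-runs first and filters them in one final pass,
-- instead of A's inline accumulator that yields at each run boundary (objective: idiomatic).


-- ===== PORT A =====
-- A's loop body: accumulate charset chars into `result`; at a non-charset char,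
-- yield `result` if long enough and reset it.
def pvStepA (min : Int) (cs : List Char) (st : List Char × List String) (c : Char) :
    List Char × List String :=
  if c ∈ cs then (st.1 ++ [c], st.2)
  else if (st.1.length : Int) ≥ min then ([], st.2 ++ [String.ofList st.1])
  else ([], st.2)

def data_strings (data : String) (min : Int) (charset : String) : List String :=
  let st := data.toList.foldl (pvStepA min charset.toList) ([], [])
  if (st.1.length : Int) ≥ min then st.2 ++ [String.ofList st.1] else st.2

-- ===== PORT B =====
-- B's loop body: a member char extends the last piece, a non-member starts a new piece.
def pvStepB (mem : PySem.Set Char) (ps : List (List Char)) (c : Char) : List (List Char) :=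
  if PySem.Set.contains mem c then ps.dropLast ++ [ps.getLast! ++ [c]] else ps ++ [[]]

def data_strings_alt (data : String) (min : Int) (charset : String) : List String :=
  let members := PySem.Set.ofList charset.toList
  let pieces := data.toList.foldl (pvStepB members) [[]]
  (pieces.filter (fun p => (p.length : Int) ≥ min)).map String.ofList

-- ===== PRECONDITION & SPEC =====
def Spec_data_strings (data : String) (min : Int) (charset : String) (out : List String) : Prop := out = data_strings_alt data min charset
instance (data : String) (min : Int) (charset : String) (out : List String) : Decidable (Spec_data_strings data min charset out) := by unfold Spec_data_strings; infer_instance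

-- ===== CLAIM (what is proved, stated in full; the proofs are below) =====
def Claim_equal_data_strings : Prop := ∀ (data : String) (min : Int) (charset : String), Dom_data_strings data min charset → Spec_data_strings data min charset (data_strings data min charset)

-- ===== LEMMAS AND PROOFS =====

theorem pv_getLast!_concat (P : List (List Char)) (cur : List Char) :
    (P ++ [cur]).getLast! = cur := by
  induction P with
  | nil => rfl
  | cons a t ih => simp [List.getLast!, ih]

theorem pv_contains_ofList (cs : List Char) (c : Char) :
    PySem.Set.contains (PySem.Set.ofList cs) c = decide (c ∈ cs) := by
  by_cases h : c ∈ cs <;> simp [h]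

theorem pv_loop (min : Int) (cs : List Char) (l : List Char) :
    ∀ (cur : List Char) (P : List (List Char)),
    (let st := l.foldl (pvStepA min cs) (cur, (P.filter (fun p => decide ((p.length : Int) ≥ min))).map String.ofList);
     if (st.1.length : Int) ≥ min then st.2 ++ [String.ofList st.1] else st.2)
    = (((l.foldl (pvStepB (PySem.Set.ofList cs)) (P ++ [cur])).filter
        (fun p => decide ((p.length : Int) ≥ min))).map String.ofList) := by
  induction l with
  | nil =>
    intro cur P
    by_cases h : (cur.length : Int) ≥ min <;>
      simp [List.filter_append, List.map_append, h]
  | cons c l ih =>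
    intro cur P
    by_cases h : c ∈ cs
    · have hB : pvStepB (PySem.Set.ofList cs) (P ++ [cur]) c = P ++ [cur ++ [c]] := by
        simp only [pvStepB, pv_contains_ofList, h, decide_true, if_true, List.dropLast_concat, pv_getLast!_concat]
      simp only [List.foldl_cons, pvStepA, h, if_pos, hB]
      simpa using ih (cur ++ [c]) P
    · have hB : pvStepB (PySem.Set.ofList cs) (P ++ [cur]) c = (P ++ [cur]) ++ [[]] := by
        simp [pvStepB, pv_contains_ofList, h]
      have hout : ∀ out : List String,
          out = (P.filter (fun p => decide ((p.length : Int) ≥ min))).map String.ofList →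
          (if (cur.length : Int) ≥ min then out ++ [String.ofList cur] else out)
          = (((P ++ [cur]).filter (fun p => decide ((p.length : Int) ≥ min))).map String.ofList) := by
        intro out hout; subst hout
        by_cases hc : (cur.length : Int) ≥ min <;>
          simp [List.filter_append, List.map_append, hc]
      simp only [List.foldl_cons, pvStepA, h, hB]
      by_cases hc : (cur.length : Int) ≥ min
      · simp only [if_pos hc]
        have := ih [] (P ++ [cur])
        simpa [List.filter_append, List.map_append, hc] using this
      · simp only [if_neg hc]
        have := ih [] (P ++ [cur])
        simpa [List.filter_append, List.map_append, hc] using this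

-- ===== VERDICT (by name: the statement is the Claim_ definition above) =====
theorem data_strings_spec : Claim_equal_data_strings := by
  intro data min charset _
  unfold Spec_data_strings data_strings data_strings_alt
  simpa using pv_loop min charset.toList data.toList [] []
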